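-- pv_equiv track=rewrite | github.com/mars-project/mars | mars/utils.py | calc_nsplits
-- ===== SOURCE A (Python) =====
-- from typing import (
--     Any,
--     List,
--     Dict,
--     NamedTuple,
--     Set,
--     Tuple,
--     Type,
--     Union,
--     Callable,
--     Optional,
-- )
--
-- def calc_nsplits(chunk_idx_to_shape: Dict[Tuple[int], Tuple[int]]) -> Tuple[Tuple[int]]:
--     """
--     Calculate a tiled entity's nsplits.
--
--     Parameters
--     ----------
--     chunk_idx_to_shape : Dict type, {chunk_idx: chunk_shape}
--
--     Returns
--     -------
--     nsplits
--     """
--     ndim = len(next(iter(chunk_idx_to_shape)))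
--     tileable_nsplits = []
--     # for each dimension, record chunk shape whose index is zero on other dimensions
--     for i in range(ndim):
--         splits = []
--         for index, shape in chunk_idx_to_shape.items():
--             if all(idx == 0 for j, idx in enumerate(index) if j != i):
--                 splits.append(shape[i])
--         tileable_nsplits.append(tuple(splits))
--     return tuple(tileable_nsplits)
-- ===== SOURCE B (Python) =====
-- def calc_nsplits(chunk_idx_to_shape):
--     ndim = len(next(iter(chunk_idx_to_shape)))
--     splits = [[] for _ in range(ndim)]
--     # one pass: an index with no nonzero coordinate lies on every axis line,
--     # one with exactly one nonzero coordinate p lies on axis p only,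
--     # any other index lies on no axis line
--     for index, shape in chunk_idx_to_shape.items():
--         nz = [j for j, idx in enumerate(index) if idx != 0]
--         if not nz:
--             for i in range(ndim):
--                 splits[i].append(shape[i])
--         elif len(nz) == 1:
--             p = nz[0]
--             if p < ndim:
--                 splits[p].append(shape[p])
--     return tuple(tuple(s) for s in splits)
-- ===== Notes on version B (the rewrite author's own statement) =====
-- stated objective: faster
-- what changed: Instead of scanning the whole dict once per dimension testing 'all other coordinates zero', B makes a single pass over the dict, computes each index's nonzero coordinate positions once, and routes the shape entry to the one matching dimension list (or to all of them for the all-zero index).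
import Mathlib
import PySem

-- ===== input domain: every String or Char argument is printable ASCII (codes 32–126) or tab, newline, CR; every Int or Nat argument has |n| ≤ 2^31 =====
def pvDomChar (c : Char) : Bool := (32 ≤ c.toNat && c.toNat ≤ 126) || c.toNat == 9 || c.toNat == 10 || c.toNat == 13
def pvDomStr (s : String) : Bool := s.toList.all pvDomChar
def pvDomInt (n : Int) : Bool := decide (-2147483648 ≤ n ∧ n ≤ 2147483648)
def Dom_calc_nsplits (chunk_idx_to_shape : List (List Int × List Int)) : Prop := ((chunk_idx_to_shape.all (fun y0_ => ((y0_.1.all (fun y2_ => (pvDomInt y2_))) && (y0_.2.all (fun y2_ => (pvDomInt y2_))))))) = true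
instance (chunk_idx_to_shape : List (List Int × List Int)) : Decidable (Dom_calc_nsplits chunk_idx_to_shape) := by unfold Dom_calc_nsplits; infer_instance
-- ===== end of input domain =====

-- B replaces A's per-dimension scan of the whole dict by a single pass that classifies each
-- chunk index by its nonzero coordinate positions (objective: faster).


-- shape[i]: total form of Python's indexing; inside Pre_ the index is always in range
def pvAt (l : List Int) (i : Nat) : Int := (PySem.List.pyGet? l (i : Int)).getD 0

-- ===== PORT A =====
-- all(idx == 0 for j, idx in enumerate(index) if j != i)
def pvQual (i : Nat) (index : List Int) : Bool :=
  (PySem.List.enumerate index 0).all (fun je => je.1 == (i : Int) || je.2 == 0)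

def calc_nsplits (chunk_idx_to_shape : List (List Int × List Int)) : List (List Int) :=
  match chunk_idx_to_shape with
  | [] => []   -- Python: next(iter({})) raises StopIteration; excluded by Pre_
  | (k, _) :: _ =>
    (List.range k.length).map (fun i =>
      chunk_idx_to_shape.foldl
        (fun splits p => if pvQual i p.1 then splits ++ [pvAt p.2 i] else splits) [])

-- ===== PORT B =====
-- nz = [j for j, idx in enumerate(index) if idx != 0]
def pvNz (index : List Int) : List Int :=
  ((PySem.List.enumerate index 0).filter (fun je => je.2 != 0)).map Prod.fst

def calc_nsplits_alt (chunk_idx_to_shape : List (List Int × List Int)) : List (List Int) :=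
  match chunk_idx_to_shape with
  | [] => []   -- Python: next(iter({})) raises StopIteration; excluded by Pre_
  | (k, _) :: _ =>
    let ndim := k.length
    chunk_idx_to_shape.foldl
      (fun acc p =>
        match pvNz p.1 with
        | [] => acc.mapIdx (fun i s => s ++ [pvAt p.2 i])
        | [p0] =>
            if p0 < (ndim : Int) then
              acc.set p0.toNat (acc.getD p0.toNat [] ++ [pvAt p.2 p0.toNat])
            else acc
        | _ => acc)
      (List.replicate ndim [])

-- ===== PRECONDITION & SPEC =====
-- Pre_ excludes: the empty dict (A raises StopIteration); association lists with duplicate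
-- keys, which do not faithfully represent a Python dict (Python collapses them before either
-- function runs); and inputs where an index lying on axis i has a shape shorter than i+1
-- (A raises IndexError on shape[i]).
def Pre_calc_nsplits (chunk_idx_to_shape : List (List Int × List Int)) : Prop :=
  chunk_idx_to_shape ≠ [] ∧
  (chunk_idx_to_shape.map Prod.fst).Nodup ∧
  ∀ p ∈ chunk_idx_to_shape, ∀ i < (chunk_idx_to_shape.headI).1.length,
    (∀ j < p.1.length, j ≠ i → p.1.getD j 0 = 0) → i < p.2.length
instance (chunk_idx_to_shape : List (List Int × List Int)) : Decidable (Pre_calc_nsplits chunk_idx_to_shape) := by unfold Pre_calc_nsplits; infer_instance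

def pvWitness_calc_nsplits : (List (List Int × List Int)) :=
  [([0, 0], [2, 3]), ([0, 1], [2, 4]), ([1, 0], [5, 3])]

def Spec_calc_nsplits (chunk_idx_to_shape : List (List Int × List Int)) (out : List (List Int)) : Prop := out = calc_nsplits_alt chunk_idx_to_shape
instance (chunk_idx_to_shape : List (List Int × List Int)) (out : List (List Int)) : Decidable (Spec_calc_nsplits chunk_idx_to_shape out) := by unfold Spec_calc_nsplits; infer_instance

-- ===== CLAIM (what is proved, stated in full; the proofs are below) =====
def Claim_equal_calc_nsplits : Prop := ∀ (chunk_idx_to_shape : List (List Int × List Int)), Dom_calc_nsplits chunk_idx_to_shape → Pre_calc_nsplits chunk_idx_to_shape → Spec_calc_nsplits chunk_idx_to_shape (calc_nsplits chunk_idx_to_shape)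

-- ===== LEMMAS AND PROOFS =====

-- the one general fact: over a list whose first components are strictly increasing,
-- "every nonzero second component sits at first component t" ↔ the nonzero-position list is [] or [t]
theorem pvAll_iff_filter (e : List (Int × Int)) (h : e.Pairwise (fun a b => a.1 < b.1)) (t : Int) :
    (e.all (fun je => je.1 == t || je.2 == 0)) = true ↔
    ((e.filter (fun je => je.2 != 0)).map Prod.fst = [] ∨
     (e.filter (fun je => je.2 != 0)).map Prod.fst = [t]) := by
  induction e with
  | nil => simp
  | cons a e ih =>
      rcases List.pairwise_cons.mp h with ⟨ha, he⟩
      by_cases hz : a.2 = 0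
      · simp only [List.all_cons, List.filter_cons, hz]
        simp only [bne_self_eq_false]
        simp [ih he]
      · simp only [List.all_cons, List.filter_cons]
        have : (a.2 != 0) = true := by simpa using hz
        simp only [this]
        constructor
        · rintro hall
          simp only [Bool.and_eq_true, Bool.or_eq_true, beq_iff_eq] at hall
          rcases hall with ⟨h1, h2⟩
          rcases h1 with h1 | h1
          · right
            rcases (ih he).mp (by simpa using h2) with hnil | hone
            · simp [hnil, h1]
            · exfalso
              have ht : t ∈ (e.filter (fun je => je.2 != 0)).map Prod.fst := by
                simp [hone]
              rcases List.mem_map.mp ht with ⟨b, hb, hbt⟩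
              have hbe : b ∈ e := List.mem_of_mem_filter hb
              have := ha b hbe
              omega
          · exact absurd h1 hz
        · rintro (hc | hc)
          · simp at hc
          · have h1 : a.1 = t ∧ (e.filter (fun je => je.2 != 0)).map Prod.fst = [] := by
              exact ⟨(List.cons_eq_cons.mp hc).1, (List.cons_eq_cons.mp hc).2⟩
            simp only [Bool.and_eq_true, Bool.or_eq_true, beq_iff_eq]
            exact ⟨Or.inl h1.1, by simpa using (ih he).mpr (Or.inl h1.2)⟩

-- A's per-dimension membership test, characterised through B's nonzero-position list
theorem pvQual_iff_nz (index : List Int) (i : Nat) :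
    pvQual i index = true ↔ (pvNz index = [] ∨ pvNz index = [(i : Int)]) :=
  pvAll_iff_filter _ (PySem.List.pairwise_lt_enumerate index 0) _

theorem pvNz_nonneg (index : List Int) (p0 : Int) (h : p0 ∈ pvNz index) : 0 ≤ p0 := by
  unfold pvNz at h
  rcases List.mem_map.mp h with ⟨b, hb, rfl⟩
  have hbe : b ∈ PySem.List.enumerate index 0 := List.mem_of_mem_filter hb
  rcases (PySem.List.mem_enumerate_iff _ _ _).mp hbe with ⟨k, hk, rfl⟩
  simp

theorem pvMapIdx_map_range {α β : Type} (n : Nat) (f : Nat → α) (g : Nat → α → β) :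
    List.mapIdx g ((List.range n).map f) = (List.range n).map (fun i => g i (f i)) := by
  apply List.ext_getElem <;> simp

-- one step of B's fold, on a state of the form (range ndim).map f, is one step of all of A's folds
theorem pvStep (ndim : Nat) (f : Nat → List Int) (p : List Int × List Int) :
    (match pvNz p.1 with
      | [] => ((List.range ndim).map f).mapIdx (fun i s => s ++ [pvAt p.2 i])
      | [p0] =>
          if p0 < (ndim : Int) then
            ((List.range ndim).map f).set p0.toNat
              ((((List.range ndim).map f).getD p0.toNat []) ++ [pvAt p.2 p0.toNat])
          else ((List.range ndim).map f)
      | _ => ((List.range ndim).map f))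
    = (List.range ndim).map (fun i => if pvQual i p.1 then f i ++ [pvAt p.2 i] else f i) := by
  rcases hnz : pvNz p.1 with _ | ⟨p0, _ | ⟨p1, l⟩⟩
  · -- all-zero index: qualifies for every dimension
    have hq : ∀ i : Nat, pvQual i p.1 = true := fun i =>
      (pvQual_iff_nz p.1 i).mpr (Or.inl hnz)
    simp only [pvMapIdx_map_range]
    exact List.map_congr_left (fun i _ => by simp [hq i])
  · -- exactly one nonzero coordinate p0
    have h0 : 0 ≤ p0 := pvNz_nonneg p.1 p0 (by simp [hnz])
    have hq : ∀ i : Nat, pvQual i p.1 = true ↔ p0 = (i : Int) := by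
      intro i
      rw [pvQual_iff_nz p.1 i, hnz]
      simp [eq_comm]
    by_cases hlt : p0 < (ndim : Int)
    · simp only [if_pos hlt]
      apply List.ext_getElem
      · simp
      · intro j hj hj'
        have hjn : j < ndim := by simpa using hj
        have hp0 : p0.toNat < ndim := by omega
        have hget : (((List.range ndim).map f).getD p0.toNat []) = f p0.toNat := by
          rw [List.getD_eq_getElem _ _ (by simpa using hp0)]
          simp
        rw [List.getElem_set]
        by_cases he : p0.toNat = j
        · have hqj : pvQual j p.1 = true := (hq j).mpr (by omega)
          rw [if_pos he, he] at *
          simp [hqj, hjn]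
        · have : pvQual j p.1 = false := by
            rw [Bool.eq_false_iff]
            intro hc
            exact he (by have := (hq j).mp hc; omega)
          simp [he, this]
    · simp only [if_neg hlt]
      refine (List.map_congr_left (fun i hi => ?_)).symm
      have : pvQual i p.1 = false := by
        rw [Bool.eq_false_iff]
        intro hc
        have := (hq i).mp hc
        simp at hi
        omega
      simp [this]
  · -- two or more nonzero coordinates: qualifies for no dimension
    refine (List.map_congr_left (fun i _ => ?_)).symm
    have : pvQual i p.1 = false := by
      rw [Bool.eq_false_iff]
      intro hc
      rcases (pvQual_iff_nz p.1 i).mp hc with h | h <;> rw [hnz] at h <;> simp at h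
    simp [this]

-- B's single fold, started on (range ndim).map f, computes all of A's per-dimension folds at once
theorem pvFold (ndim : Nat) (l : List (List Int × List Int)) (f : Nat → List Int) :
    l.foldl
      (fun acc p =>
        match pvNz p.1 with
        | [] => acc.mapIdx (fun i s => s ++ [pvAt p.2 i])
        | [p0] =>
            if p0 < (ndim : Int) then
              acc.set p0.toNat (acc.getD p0.toNat [] ++ [pvAt p.2 p0.toNat])
            else acc
        | _ => acc)
      ((List.range ndim).map f)
    = (List.range ndim).map (fun i =>
        l.foldl (fun splits p => if pvQual i p.1 then splits ++ [pvAt p.2 i] else splits) (f i)) := by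
  induction l generalizing f with
  | nil => rfl
  | cons p l ih =>
      simp only [List.foldl_cons]
      rw [pvStep ndim f p, ih]

-- ===== VERDICT (by name: the statement is the Claim_ definition above) =====
theorem calc_nsplits_spec : Claim_equal_calc_nsplits := by
  intro xs _ _
  unfold Spec_calc_nsplits calc_nsplits calc_nsplits_alt
  match xs with
  | [] => rfl
  | (k, s) :: rest =>
      have h0 : (List.replicate k.length ([] : List Int))
          = (List.range k.length).map (fun _ => ([] : List Int)) := by
        simp [List.map_const']
      simp only [h0]
      rw [pvFold k.length ((k, s) :: rest) (fun _ => [])]
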